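-- pv_equiv track=rewrite | github.com/crazysjf/GTracker-server | common/utils.py | gen_diff2
-- ===== SOURCE A (Python) =====
-- def gen_diff2(a):
--     '''
--     版本2
--     计算数组a的差分并返回。
--     a中允许有None存在。如果a[i] == None, 则a[i] = a[i+1]
--     如果全部为None，则全部作为0.
--     返回数组的长度比a的长度小1。
--     假设返回值为r:
--
--     [1, 2, 3]    => [1, 1]
--     [1, None, 3] => [2, 0]
--     [None, 2, 3] => [0, 1]
--     [None, None, 3] => [0, 3]
--     [None, None, None] => [0, 0, 0]
--
--     '''
--     r = [None] * (len(a) - 1)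
--
--     for i in range(len(a) - 1, -1, -1):
--         if a[i] != None:
--             # 把后部为None的填充为最近的非None值
--             for j in range(i + 1, len(a)):
--                 a[j] = a[i]
--             break
--
--         if i == 0 and a[i] == None:
--             # 整个数组全部为None
--             for j in range(0, len(a)):
--                 a[j] = 0
--
--     for i in range(len(a) - 1, -1, -1):
--         if i != len(a) - 1 and a[i] == None:
--             a[i] = a[i + 1]
--
--     for i in range(1, len(a)):
--         # if a[i] == None and a[i-1] == None:
--         #     print r
--         r[i - 1] = a[i] - a[i - 1]
--     return r
-- ===== SOURCE B (Python) =====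
-- def gen_diff2(a):
--     # Sparse construction: no fill passes, no mutation of a (return value only).
--     # r[p] = 0 everywhere except at each non-None position p that has another
--     # non-None position after it, where r[p] = (next non-None value) - a[p].
--     r = [0] * (len(a) - 1)
--     known = [(i, v) for i, v in enumerate(a) if v is not None]
--     for (p, x), (_, y) in zip(known, known[1:]):
--         r[p] = y - x
--     return r
-- ===== Notes on version B (the rewrite author's own statement) =====
-- stated objective: alternative
-- what changed: Instead of filling the Nones (A's three in-place passes: suffix fill with break, backward backfill, then adjacent subtraction), B never fills anything: it starts from an all-zero result, collects the (index, value) pairs of the non-None entries once, and writes (next value - value) only at each non-None position that has a later non-None, leaving a unmutated; correct because between consecutive known positions the filled array A builds is constant, so all other differences are 0.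
import Mathlib
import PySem

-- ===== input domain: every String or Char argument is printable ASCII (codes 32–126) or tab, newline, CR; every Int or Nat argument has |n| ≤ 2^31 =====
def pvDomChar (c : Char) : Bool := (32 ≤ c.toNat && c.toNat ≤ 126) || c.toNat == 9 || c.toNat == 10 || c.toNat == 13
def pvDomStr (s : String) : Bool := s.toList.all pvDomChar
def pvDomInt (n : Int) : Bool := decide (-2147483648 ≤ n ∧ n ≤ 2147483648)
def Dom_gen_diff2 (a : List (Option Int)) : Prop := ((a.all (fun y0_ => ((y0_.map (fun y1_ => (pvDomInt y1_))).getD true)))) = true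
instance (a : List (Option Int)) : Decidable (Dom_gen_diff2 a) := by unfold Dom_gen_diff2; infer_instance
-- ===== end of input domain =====

-- B replaces A's three fill-then-diff passes with a sparse construction that writes the
-- non-zero differences directly into an all-zero result; A mutates `a` in place, B does not:
-- the equivalence proved here is about the RETURN value only.

-- ===== PORT A =====
-- A's first loop scans i from len-1 down to 0 with a break at the first (rightmost) non-None,
-- then fills every later slot with that value; if it reaches i=0 with everything None it fills
-- the whole list with 0.  Structural encoding of that right-to-left scan with break:
-- `some ys` = the break already fired inside the suffix (result ys), `none` = suffix all None.
def gd2Loop1Go : List (Option Int) → Option (List (Option Int))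
  | [] => none
  | x :: xs =>
      match gd2Loop1Go xs with
      | some ys => some (x :: ys)                        -- break happened to the right; a[i] untouched
      | none =>
          match x with
          | some v => some (some v :: xs.map (fun _ => some v))  -- fill a[j] = a[i] for j > i, break
          | none => none                                 -- continue scanning left

def gd2Loop1 (a : List (Option Int)) : List (Option Int) :=
  match gd2Loop1Go a with
  | some ys => ys
  | none => a.map (fun _ => some 0)                      -- i == 0 and a[i] == None: all zeros

-- A's second loop: for i from len-1 down to 0, if i != len-1 and a[i] == None then a[i] = a[i+1]
-- (a[i+1] already processed).  Structural right-to-left recursion over the same state.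
def gd2Loop2 : List (Option Int) → List (Option Int)
  | [] => []
  | x :: xs =>
      let ys := gd2Loop2 xs
      (if xs.isEmpty then x else if x = none then ys.headD none else x) :: ys

-- A's third loop: r[i-1] = a[i] - a[i-1] for i in 1..len-1.  At this point every entry is
-- non-None in Python (ints); `.getD 0` only converts Option Int to Int and is never the default
-- on reachable states.
def gd2Loop3 : List (Option Int) → List Int
  | x :: y :: xs => (y.getD 0 - x.getD 0) :: gd2Loop3 (y :: xs)
  | _ => []

def gen_diff2 (a : List (Option Int)) : List Int :=
  gd2Loop3 (gd2Loop2 (gd2Loop1 a))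

-- ===== PORT B =====
-- known = [(i, v) for i, v in enumerate(a) if v is not None]
def gd2Known (a : List (Option Int)) : List (Int × Int) :=
  (PySem.List.enumerate a).filterMap (fun iv => iv.2.map (fun x => (iv.1, x)))

-- for (p, x), (_, y) in zip(known, known[1:]): r[p] = y - x
def gen_diff2_alt (a : List (Option Int)) : List Int :=
  let r := List.replicate (a.length - 1) (0 : Int)
  let known := gd2Known a
  (known.zip (known.drop 1)).foldl
    (fun r pq => PySem.List.pySetD r pq.1.1 (pq.2.2 - pq.1.2)) r

-- ===== PRECONDITION & SPEC =====
def Spec_gen_diff2 (a : List (Option Int)) (out : List Int) : Prop := out = gen_diff2_alt a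
instance (a : List (Option Int)) (out : List Int) : Decidable (Spec_gen_diff2 a out) := by unfold Spec_gen_diff2; infer_instance

-- ===== CLAIM (what is proved, stated in full; the proofs are below) =====
def Claim_equal_gen_diff2 : Prop := ∀ (a : List (Option Int)), Dom_gen_diff2 a → Spec_gen_diff2 a (gen_diff2 a)

-- ===== LEMMAS AND PROOFS =====

-- common reference: head entry is (next non-None value - this value) when this entry is
-- non-None and a later non-None exists, else 0
def gd2Spec : List (Option Int) → List Int
  | [] => []
  | [_] => []
  | x :: y :: xs =>
      (match x, (y :: xs).findSome? id with
       | some v, some w => w - v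
       | _, _ => 0) :: gd2Spec (y :: xs)

-- ---- A = gd2Spec (reusing the fill characterisation gd2Ref) ----

def gd2Ref : Option Int → List (Option Int) → List Int
  | _, [] => []
  | prev, x :: xs =>
      let v : Int :=
        match (x :: xs).findSome? id with
        | some w => w
        | none => prev.getD 0
      v :: gd2Ref (some v) xs

theorem findSome?_none_allNone (l : List (Option Int)) (h : l.findSome? id = none) :
    ∀ x ∈ l, x = none := by
  induction l with
  | nil => simp
  | cons x xs ih =>
      cases x with
      | some v => simp [List.findSome?] at h
      | none =>
          simp [List.findSome?] at h
          intro y hy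
          rcases List.mem_cons.mp hy with hy | hy
          · exact hy
          · exact h y hy

theorem allNone_findSome? (l : List (Option Int)) (h : ∀ x ∈ l, x = none) :
    l.findSome? id = none := by
  induction l with
  | nil => rfl
  | cons x xs ih =>
      have hx : x = none := h x (by simp)
      have := ih (fun y hy => h y (by simp [hy]))
      simp [List.findSome?, hx, this]

theorem gd2Loop1Go_allNone (l : List (Option Int)) (h : ∀ x ∈ l, x = none) :
    gd2Loop1Go l = none := by
  induction l with
  | nil => rfl
  | cons x xs ih =>
      have hx : x = none := h x (by simp)
      have hxs : gd2Loop1Go xs = none := ih (fun y hy => h y (by simp [hy]))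
      simp [gd2Loop1Go, hxs, hx]

theorem gd2Loop2_noNone (l : List (Option Int)) (h : ∀ x ∈ l, x ≠ none) :
    gd2Loop2 l = l := by
  induction l with
  | nil => rfl
  | cons x xs ih =>
      have hx : x ≠ none := h x (by simp)
      have hxs := ih (fun y hy => h y (by simp [hy]))
      cases hxse : xs.isEmpty
      · simp [gd2Loop2, hxse, hx, hxs]
      · simp [gd2Loop2, hxse, hxs]

theorem gd2Ref_allNone (l : List (Option Int)) (h : ∀ x ∈ l, x = none) :
    ∀ w : Int, gd2Ref (some w) l = l.map (fun _ => w) := by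
  induction l with
  | nil => intro w; rfl
  | cons x xs ih =>
      intro w
      have hfs : (x :: xs).findSome? id = none := allNone_findSome? _ h
      have := ih (fun y hy => h y (by simp [hy])) w
      simp only [gd2Ref, hfs, List.map_cons]
      simp [this]

theorem gd2Ref_cons_some (prev : Option Int) (v : Int) (t : List (Option Int)) :
    gd2Ref prev (some v :: t) = v :: gd2Ref (some v) t := rfl

theorem gd2Loop2_headD (l : List (Option Int)) :
    (gd2Loop2 l).headD none = l.findSome? id := by
  induction l with
  | nil => rfl
  | cons x xs ih =>
      cases x with
      | some v =>
          cases hxse : xs.isEmpty <;> simp [gd2Loop2, hxse, List.findSome?]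
      | none =>
          cases hxse : xs.isEmpty with
          | false =>
              simp only [gd2Loop2, hxse, Bool.false_eq_true, if_false,
                List.headD_cons, List.findSome?_cons, id_eq]
              exact ih
          | true =>
              have : xs = [] := by simpa [List.isEmpty_iff] using hxse
              subst this
              simp [gd2Loop2, List.findSome?]

theorem gd2_main (l : List (Option Int)) (v : Int) (t : List (Option Int))
    (ht : ∀ x ∈ t, x = none) :
    ∀ prev, (gd2Loop2 (l ++ some v :: t.map (fun _ => some v))).map (fun o => o.getD 0)
      = gd2Ref prev (l ++ some v :: t) := by
  induction l with
  | nil =>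
      intro prev
      have h2 : gd2Loop2 (some v :: t.map (fun _ => some v)) = some v :: t.map (fun _ => some v) := by
        apply gd2Loop2_noNone
        intro x hx
        rcases List.mem_cons.mp hx with h | h
        · simp [h]
        · rcases List.mem_map.mp h with ⟨y, _, hy⟩
          simp [← hy]
      rw [List.nil_append, List.nil_append, h2, gd2Ref_cons_some,
        gd2Ref_allNone t ht v]
      simp
  | cons x xs ih =>
      intro prev
      have hfs : (xs ++ some v :: t).findSome? id ≠ none := by
        intro h
        have := findSome?_none_allNone _ h (some v) (by simp)
        simp at this
      have hfs2 : (xs ++ some v :: t.map (fun _ => some v)).findSome? id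
          = (xs ++ some v :: t).findSome? id := by
        rw [List.findSome?_append, List.findSome?_append]
        cases hres : xs.findSome? id
        · simp [List.findSome?]
        · simp
      have hxse : (xs ++ some v :: t.map (fun _ => some v)).isEmpty = false := by
        simp
      cases hres : (xs ++ some v :: t).findSome? id with
      | none => exact absurd hres hfs
      | some w =>
          cases x with
          | some u =>
              simp only [List.cons_append, gd2Loop2, hxse, Bool.false_eq_true, if_false,
                List.map_cons]
              rw [ih (some u)]
              simp only [gd2Ref, List.findSome?_cons, id_eq]
              simp
          | none =>
              simp only [List.cons_append, gd2Loop2, hxse, Bool.false_eq_true, if_false,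
                List.map_cons]
              rw [gd2Loop2_headD, hfs2, hres]
              rw [ih (some w)]
              simp only [gd2Ref, List.findSome?_cons, id_eq, hres]
              simp

theorem exists_last_some (a : List (Option Int)) (h : a.findSome? id ≠ none) :
    ∃ l v t, a = l ++ some v :: t ∧ ∀ x ∈ t, x = none := by
  induction a with
  | nil => simp [List.findSome?] at h
  | cons x xs ih =>
      cases hres : xs.findSome? id with
      | some w' =>
          rcases ih (by simp [hres]) with ⟨l, v, t, heq, ht⟩
          exact ⟨x :: l, v, t, by simp [heq], ht⟩
      | none =>
          have hxs := findSome?_none_allNone xs hres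
          cases x with
          | some u => exact ⟨[], u, xs, rfl, hxs⟩
          | none => simp [List.findSome?, hres] at h

theorem gd2_fill_eq (a : List (Option Int)) :
    (gd2Loop2 (gd2Loop1 a)).map (fun o => o.getD 0) = gd2Ref none a := by
  cases hfs : a.findSome? id with
  | none =>
      have hall := findSome?_none_allNone a hfs
      have h1 : gd2Loop1 a = a.map (fun _ => some 0) := by
        simp [gd2Loop1, gd2Loop1Go_allNone a hall]
      rw [h1]
      have h2 : gd2Loop2 (a.map (fun _ => (some 0 : Option Int))) = a.map (fun _ => some 0) := by
        apply gd2Loop2_noNone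
        intro x hx
        rcases List.mem_map.mp hx with ⟨y, _, hy⟩
        simp [← hy]
      rw [h2]
      cases a with
      | nil => rfl
      | cons x xs =>
          have hx : x = none := hall x (by simp)
          have hxs : ∀ y ∈ xs, y = none := fun y hy => hall y (by simp [hy])
          have hfs' : (xs.findSome? id) = none := by
            simpa [List.findSome?, hx] using hfs
          simp only [gd2Ref, List.findSome?_cons, hx, id_eq, hfs', Option.getD_none,
            List.map_cons]
          rw [gd2Ref_allNone xs hxs 0]
          simp
  | some w =>
      rcases exists_last_some a (by simp [hfs]) with ⟨l, v, t, heq, ht⟩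
      subst heq
      have h1 : gd2Loop1 (l ++ some v :: t) = l ++ some v :: t.map (fun _ => some v) := by
        unfold gd2Loop1
        have hgo : ∀ (l' : List (Option Int)), gd2Loop1Go (l' ++ some v :: t)
            = some (l' ++ some v :: t.map (fun _ => some v)) := by
          intro l'
          induction l' with
          | nil =>
              have : gd2Loop1Go t = none := gd2Loop1Go_allNone t ht
              simp [gd2Loop1Go, this]
          | cons x xs ih => simp [gd2Loop1Go, ih]
        rw [hgo l]
      rw [h1, gd2_main l v t ht none]

theorem gd2Loop3_zip (l : List (Option Int)) :
    gd2Loop3 l = List.zipWith (fun x y => y - x) (l.map (fun o => o.getD 0))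
      ((l.map (fun o => o.getD 0)).drop 1) := by
  induction l with
  | nil => rfl
  | cons x xs ih =>
      cases xs with
      | nil => rfl
      | cons y ys =>
          simp only [gd2Loop3, List.map_cons, List.drop_succ_cons, List.drop_zero,
            List.zipWith_cons_cons]
          rw [ih]
          simp

-- zipWith differences of the reference fill = gd2Spec
theorem gd2Ref_spec (l : List (Option Int)) :
    ∀ prev, List.zipWith (fun x y => y - x) (gd2Ref prev l) ((gd2Ref prev l).drop 1)
      = gd2Spec l := by
  induction l with
  | nil => intro prev; rfl
  | cons x t ih =>
      intro prev
      cases t with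
      | nil => cases x <;> rfl
      | cons y xs =>
          have hih := ih (some (match (x :: y :: xs).findSome? id with
            | some w => w | none => prev.getD 0))
          cases x with
          | some v =>
              cases hfs : (y :: xs).findSome? id with
              | some w =>
                  simp only [gd2Ref, List.findSome?_cons, id_eq, hfs] at hih ⊢
                  simp only [gd2Spec, hfs]
                  rw [← hih]
                  simp
              | none =>
                  simp only [gd2Ref, List.findSome?_cons, id_eq, hfs] at hih ⊢
                  simp only [gd2Spec, hfs]
                  rw [← hih]
                  simp
          | none =>
              cases hfs : (y :: xs).findSome? id with
              | some w =>
                  simp only [gd2Ref, List.findSome?_cons, id_eq, hfs] at hih ⊢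
                  simp only [gd2Spec]
                  rw [← hih]
                  simp
              | none =>
                  simp only [gd2Ref, List.findSome?_cons, id_eq, hfs] at hih ⊢
                  simp only [gd2Spec]
                  rw [← hih]
                  simp

-- ---- B = gd2Spec ----

-- proof-local abbreviations for B's fold
def gd2F (r : List Int) (ps : List ((Int × Int) × (Int × Int))) : List Int :=
  ps.foldl (fun r pq => PySem.List.pySetD r pq.1.1 (pq.2.2 - pq.1.2)) r

def gd2Pairs (l : List (Int × Int)) : List ((Int × Int) × (Int × Int)) :=
  l.zip (l.drop 1)

theorem enumerate_shift (xs : List (Option Int)) :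
    ∀ s : Int, PySem.List.enumerate xs (s + 1)
      = (PySem.List.enumerate xs s).map (fun iv => (iv.1 + 1, iv.2)) := by
  induction xs with
  | nil => intro s; simp [PySem.List.enumerate_nil]
  | cons x xs ih =>
      intro s
      rw [PySem.List.enumerate_cons, PySem.List.enumerate_cons, ih (s + 1)]
      simp

theorem gd2Known_cons (x : Option Int) (xs : List (Option Int)) :
    gd2Known (x :: xs) = (match x with
      | some v => ((0 : Int), v) :: (gd2Known xs).map (fun pv => (pv.1 + 1, pv.2))
      | none => (gd2Known xs).map (fun pv => (pv.1 + 1, pv.2))) := by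
  have hsh := enumerate_shift xs 0
  have hmap : ((PySem.List.enumerate xs 0).map (fun iv => ((iv.1 + 1 : Int), iv.2))).filterMap
        (fun iv => iv.2.map (fun v => (iv.1, v)))
      = (gd2Known xs).map (fun pv => (pv.1 + 1, pv.2)) := by
    rw [List.filterMap_map, gd2Known, List.map_filterMap]
    apply List.filterMap_congr
    intro iv _
    cases hiv : iv.2 <;> simp [hiv]
  cases x with
  | some v =>
      simp only [gd2Known, PySem.List.enumerate_cons, List.filterMap_cons, Option.map_some]
      rw [hsh, hmap]
      rfl
  | none =>
      simp only [gd2Known, PySem.List.enumerate_cons, List.filterMap_cons, Option.map_none]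
      rw [hsh, hmap]
      rfl

theorem gd2Known_nonneg (a : List (Option Int)) :
    ∀ pv ∈ gd2Known a, 0 ≤ pv.1 := by
  induction a with
  | nil => intro pv h; simp [gd2Known, PySem.List.enumerate_nil] at h
  | cons x xs ih =>
      intro pv h
      rw [gd2Known_cons] at h
      cases x with
      | some v =>
          rcases List.mem_cons.mp h with h | h
          · simp [h]
          · rcases List.mem_map.mp h with ⟨qv, hq, hqe⟩
            have := ih qv hq; subst hqe; simp; omega
      | none =>
          rcases List.mem_map.mp h with ⟨qv, hq, hqe⟩
          have := ih qv hq; subst hqe; simp; omega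

theorem gd2Known_head (a : List (Option Int)) :
    a.findSome? id = ((gd2Known a).head?).map (fun pv => pv.2) := by
  induction a with
  | nil => simp [gd2Known, PySem.List.enumerate_nil]
  | cons x xs ih =>
      rw [List.findSome?_cons]
      cases x with
      | some v => simp [gd2Known_cons]
      | none =>
          simp only [gd2Known_cons, id_eq]
          rw [ih]
          cases (gd2Known xs) <;> simp

theorem gd2Known_nil_allNone (a : List (Option Int)) (h : gd2Known a = []) :
    ∀ x ∈ a, x = none := by
  have := gd2Known_head a
  rw [h] at this
  simp at this
  exact this

theorem gd2Spec_allNone (l : List (Option Int)) (h : ∀ x ∈ l, x = none) :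
    gd2Spec l = List.replicate (l.length - 1) 0 := by
  induction l with
  | nil => rfl
  | cons x t ih =>
      cases t with
      | nil => rfl
      | cons y xs =>
          have hx : x = none := h x (by simp)
          have ht : ∀ z ∈ y :: xs, z = none := fun z hz => h z (by simp [hz])
          simp only [gd2Spec, hx]
          rw [ih ht]
          simp [List.replicate_succ]

theorem gd2F_shift (ps : List ((Int × Int) × (Int × Int))) :
    ∀ (r : List Int) (z : Int), (∀ pq ∈ ps, 0 ≤ pq.1.1) →
      gd2F (z :: r) (ps.map (fun pq => ((pq.1.1 + 1, pq.1.2), (pq.2.1 + 1, pq.2.2))))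
        = z :: gd2F r ps := by
  induction ps with
  | nil => intro r z _; rfl
  | cons pq ps ih =>
      intro r z h
      have hp : 0 ≤ pq.1.1 := h pq (by simp)
      have hset : PySem.List.pySetD (z :: r) (pq.1.1 + 1) (pq.2.2 - pq.1.2)
          = z :: PySem.List.pySetD r pq.1.1 (pq.2.2 - pq.1.2) := by
        have h1 : (0 : Int) ≤ pq.1.1 + 1 := by omega
        rw [PySem.List.pySetD_of_nonneg (z :: r) (pq.2.2 - pq.1.2) h1,
          PySem.List.pySetD_of_nonneg r (pq.2.2 - pq.1.2) hp]
        have : (pq.1.1 + 1).toNat = pq.1.1.toNat + 1 := by omega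
        rw [this, List.set_cons_succ]
      simp only [List.map_cons, gd2F, List.foldl_cons, hset]
      exact ih _ z (fun q hq => h q (by simp [hq]))

theorem gd2_B_spec (a : List (Option Int)) : gen_diff2_alt a = gd2Spec a := by
  suffices h : ∀ l : List (Option Int),
      gd2F (List.replicate (l.length - 1) 0) (gd2Pairs (gd2Known l)) = gd2Spec l by
    exact h a
  intro l
  induction l with
  | nil => rfl
  | cons x t ih =>
      cases t with
      | nil => cases x <;> rfl
      | cons y xs =>
          have hrep : List.replicate ((x :: y :: xs).length - 1) (0 : Int)
              = 0 :: List.replicate ((y :: xs).length - 1) 0 := by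
            simp [List.replicate_succ]
          have hshiftpairs : ∀ K : List (Int × Int),
              gd2Pairs (K.map (fun pv => (pv.1 + 1, pv.2)))
                = (gd2Pairs K).map (fun pq => ((pq.1.1 + 1, pq.1.2), (pq.2.1 + 1, pq.2.2))) := by
            intro K
            unfold gd2Pairs
            rw [← List.map_drop, List.zip_map]
            rfl
          have hnn : ∀ pq ∈ gd2Pairs (gd2Known (y :: xs)), 0 ≤ pq.1.1 := by
            intro pq hpq
            have := List.of_mem_zip hpq
            exact gd2Known_nonneg _ pq.1 this.1
          cases hx : x with
          | none =>
              subst hx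
              rw [hrep, gd2Known_cons]
              simp only
              rw [hshiftpairs, gd2F_shift _ _ _ hnn, ih]
              simp [gd2Spec]
          | some v =>
              subst hx
              rw [hrep, gd2Known_cons]
              simp only
              cases hK : gd2Known (y :: xs) with
              | nil =>
                  have hall := gd2Known_nil_allNone _ hK
                  have hfs : (y :: xs).findSome? id = none := allNone_findSome? _ hall
                  simp only [gd2Pairs, List.map_nil, List.drop_succ_cons, List.drop_nil,
                    List.zip_nil_right]
                  show (0 : Int) :: List.replicate ((y :: xs).length - 1) 0 = gd2Spec (some v :: y :: xs)
                  simp only [gd2Spec, hfs]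
                  rw [gd2Spec_allNone _ hall]
              | cons qw K' =>
                  have hfs : (y :: xs).findSome? id = some qw.2 := by
                    rw [gd2Known_head, hK]; rfl
                  have hpairs : gd2Pairs (((0 : Int), v) :: (qw :: K').map (fun pv => (pv.1 + 1, pv.2)))
                      = (((0 : Int), v), (qw.1 + 1, qw.2))
                        :: gd2Pairs ((qw :: K').map (fun pv => (pv.1 + 1, pv.2))) := by
                    simp [gd2Pairs]
                  rw [hpairs]
                  simp only [gd2F, List.foldl_cons]
                  have hset0 : PySem.List.pySetD
                      ((0 : Int) :: List.replicate ((y :: xs).length - 1) 0) (0 : Int) (qw.2 - v)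
                      = (qw.2 - v) :: List.replicate ((y :: xs).length - 1) 0 := by
                    rw [show ((0 : Int)) = ((0 : Nat) : Int) from rfl, PySem.List.pySetD_natCast]
                    rfl
                  rw [hset0]
                  have := hshiftpairs (qw :: K')
                  rw [hK] at hnn
                  show gd2F ((qw.2 - v) :: List.replicate ((y :: xs).length - 1) 0)
                      (gd2Pairs ((qw :: K').map (fun pv => (pv.1 + 1, pv.2)))) = _
                  rw [this, gd2F_shift _ _ _ hnn]
                  rw [hK] at ih
                  rw [ih]
                  simp [gd2Spec, hfs]

-- ===== VERDICT (by name: the statement is the Claim_ definition above) =====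
theorem gen_diff2_spec : Claim_equal_gen_diff2 := by
  intro a _
  show gd2Loop3 (gd2Loop2 (gd2Loop1 a)) = gen_diff2_alt a
  rw [gd2Loop3_zip, gd2_fill_eq, gd2Ref_spec a none, gd2_B_spec]
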